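-- pv_equiv track=rewrite | github.com/alvieupnext/multi-agent-navigation | environments/five_grid.py | createStateMapping
-- ===== SOURCE A (Python) =====
-- def createStateMapping(num_states, illegal_states):
--     """
--     Create a mapping from original states to new states, excluding illegal states.
--
--     :param num_states: The total number of states in the original state space.
--     :param illegal_states: A list of states that are considered illegal and should be excluded.
--     :return: A dictionary mapping from original states to new states.
--     """
--     new_state_mapping = {}
--     new_state_index = 0
--
--     for original_state in range(num_states):
--         if original_state not in illegal_states:
--             new_state_mapping[original_state] = new_state_index
--             new_state_index += 1
--         else:
--             new_state_mapping[original_state] = None  # Mark illegal states with None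
--
--     return new_state_mapping
-- ===== SOURCE B (Python) =====
-- def createStateMapping(num_states, illegal_states):
--     """Alternative: no running index — each legal state's new index is computed
--     independently as s minus the number of distinct in-range illegal states below s."""
--     illegal = {t for t in illegal_states if 0 <= t < num_states}
--     return {s: (None if s in illegal else s - sum(1 for t in illegal if t < s))
--             for s in range(num_states)}
-- ===== Notes on version B (the rewrite author's own statement) =====
-- stated objective: alternative
-- what changed: Replaced the running new_state_index accumulator with an independent per-state computation: dedup the in-range illegal states into a set, then map each state to None if illegal, else to s minus the count of distinct illegal states below s.
import Mathlib
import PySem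

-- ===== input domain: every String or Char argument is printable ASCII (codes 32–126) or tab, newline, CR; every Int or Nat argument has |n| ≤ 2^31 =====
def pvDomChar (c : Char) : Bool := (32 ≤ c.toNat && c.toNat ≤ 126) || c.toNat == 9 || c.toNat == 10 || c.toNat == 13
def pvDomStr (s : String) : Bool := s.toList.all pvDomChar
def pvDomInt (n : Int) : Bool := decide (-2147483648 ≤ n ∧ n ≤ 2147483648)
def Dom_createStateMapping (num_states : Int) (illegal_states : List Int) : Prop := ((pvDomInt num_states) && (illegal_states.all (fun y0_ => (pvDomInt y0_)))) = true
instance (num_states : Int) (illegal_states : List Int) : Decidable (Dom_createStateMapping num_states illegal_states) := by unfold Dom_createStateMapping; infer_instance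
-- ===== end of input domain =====

-- B drops A's running new_state_index: each legal state's index is computed independently
-- as s minus the count of distinct in-range illegal states below s (objective: alternative).

-- ===== PORT A =====
def createStateMapping (num_states : Int) (illegal_states : List Int) : List (Int × Option Int) :=
  -- new_state_mapping = {}; new_state_index = 0; for original_state in range(num_states): …
  ((PySem.List.pyRange 0 num_states 1).foldl
    (fun (st : PySem.Dict Int (Option Int) × Int) original_state =>
      if original_state ∉ illegal_states then
        (st.1.insert original_state (some st.2), st.2 + 1)
      else
        (st.1.insert original_state none, st.2))
    (PySem.Dict.empty, 0)).1.items

-- ===== PORT B =====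
def createStateMapping_alt (num_states : Int) (illegal_states : List Int) : List (Int × Option Int) :=
  -- illegal = {t for t in illegal_states if 0 <= t < num_states}
  let illegal : PySem.Set Int :=
    PySem.Set.ofList (illegal_states.filter (fun t => decide (0 ≤ t) && decide (t < num_states)))
  -- {s: (None if s in illegal else s - sum(1 for t in illegal if t < s)) for s in range(num_states)}
  (PySem.List.pyRange 0 num_states 1).map (fun s =>
    (s, if s ∈ illegal then none
        else some (s - (illegal.map (fun t => if t < s then (1 : Int) else 0)).sum)))

-- ===== PRECONDITION & SPEC =====
def Spec_createStateMapping (num_states : Int) (illegal_states : List Int) (out : List (Int × Option Int)) : Prop := out = createStateMapping_alt num_states illegal_states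
instance (num_states : Int) (illegal_states : List Int) (out : List (Int × Option Int)) : Decidable (Spec_createStateMapping num_states illegal_states out) := by unfold Spec_createStateMapping; infer_instance

-- ===== CLAIM (what is proved, stated in full; the proofs are below) =====
def Claim_equal_createStateMapping : Prop := ∀ (num_states : Int) (illegal_states : List Int), Dom_createStateMapping num_states illegal_states → Spec_createStateMapping num_states illegal_states (createStateMapping num_states illegal_states)

-- ===== LEMMAS AND PROOFS =====

-- the deduplicated, in-range illegal set
def illegalSet (num_states : Int) (illegal_states : List Int) : PySem.Set Int :=
  PySem.Set.ofList (illegal_states.filter (fun t => decide (0 ≤ t) && decide (t < num_states)))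

-- the per-state entry B produces, phrased with countP
def entryF (num_states : Int) (illegal_states : List Int) (s : Int) : Int × Option Int :=
  (s, if s ∈ illegal_states then none
      else some (s - ((illegalSet num_states illegal_states).countP (fun t => decide (t < s)))))

lemma countP_lt_succ (l : List Int) (s : Int) :
    l.countP (fun t => decide (t < s + 1)) = l.countP (fun t => decide (t < s)) + l.count s := by
  induction l with
  | nil => simp
  | cons x xs ih =>
    simp only [List.countP_cons, List.count_cons, ih]
    by_cases h1 : x < s + 1 <;> by_cases h2 : x < s <;> by_cases h3 : x = s <;>
      simp [h1, h2, h3] <;> omega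

lemma mem_illegalSet_iff (num_states : Int) (illegal_states : List Int) (s : Int)
    (h0 : 0 ≤ s) (h1 : s < num_states) :
    s ∈ illegalSet num_states illegal_states ↔ s ∈ illegal_states := by
  simp [illegalSet, PySem.Set.mem_ofList, List.mem_filter, h0, h1]

lemma fold_eq (num_states : Int) (illegal_states : List Int) (m : Nat)
    (hm : (m : Int) ≤ num_states) :
    (PySem.List.pyRange 0 (m : Int) 1).foldl
      (fun (st : PySem.Dict Int (Option Int) × Int) original_state =>
        if original_state ∉ illegal_states then
          (st.1.insert original_state (some st.2), st.2 + 1)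
        else
          (st.1.insert original_state none, st.2))
      (PySem.Dict.empty, 0)
    = (PySem.Dict.mk ((PySem.List.pyRange 0 (m : Int) 1).map (entryF num_states illegal_states)),
       (m : Int) - ((illegalSet num_states illegal_states).countP (fun t => decide (t < (m : Int))))) := by
  induction m with
  | zero =>
    rw [PySem.List.pyRange_one_eq_nil (by omega)]
    have hz : (illegalSet num_states illegal_states).countP (fun t => decide (t < (0 : Int))) = 0 := by
      apply List.countP_eq_zero.mpr
      intro t ht
      have : t ∈ illegal_states.filter (fun t => decide (0 ≤ t) && decide (t < num_states)) := by
        simpa [illegalSet, PySem.Set.mem_ofList] using ht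
      have := (List.mem_filter.mp this).2
      simp at this ⊢
      omega
    simp [hz, PySem.Dict.empty]
  | succ m ih =>
    have hm' : (m : Int) ≤ num_states := by push_cast at hm ⊢; omega
    have hlt : (m : Int) < num_states := by push_cast at hm; omega
    have hsplit : PySem.List.pyRange 0 ((m + 1 : Nat) : Int) 1
        = PySem.List.pyRange 0 (m : Int) 1 ++ [(m : Int)] := by
      push_cast
      exact PySem.List.pyRange_one_succ_right (by omega)
    rw [hsplit, List.foldl_append, ih hm', List.map_append, List.foldl_cons, List.foldl_nil]
    have hcontains : (PySem.Dict.mk ((PySem.List.pyRange 0 (m : Int) 1).map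
        (entryF num_states illegal_states))).contains (m : Int) = false := by
      rw [PySem.Dict.contains_mk]
      simp only [List.any_eq_false]
      intro p hp
      obtain ⟨s, hs, rfl⟩ := List.mem_map.mp hp
      have := PySem.List.mem_pyRange_one.mp hs
      simp only [entryF, beq_iff_eq]
      omega
    have hcount : (illegalSet num_states illegal_states).countP (fun t => decide (t < ((m : Int) + 1)))
        = (illegalSet num_states illegal_states).countP (fun t => decide (t < (m : Int)))
          + (illegalSet num_states illegal_states).count (m : Int) := countP_lt_succ _ _
    by_cases hmem : (m : Int) ∈ illegal_states
    · -- illegal state: entry is none, index unchanged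
      have hcnt1 : (illegalSet num_states illegal_states).count (m : Int) = 1 :=
        List.count_eq_one_of_mem (PySem.Set.nodup_ofList _)
          ((mem_illegalSet_iff num_states illegal_states (m : Int) (by omega) hlt).mpr hmem)
      rw [if_neg (not_not_intro hmem)]
      refine Prod.ext ?_ ?_
      · apply PySem.Dict.ext
        rw [PySem.Dict.items_insert_of_not_contains _ _ hcontains]
        simp [entryF, hmem]
      · simp only []
        push_cast
        omega
    · -- legal state: entry is the running index, which equals m - (#illegal below m)
      have hcnt0 : (illegalSet num_states illegal_states).count (m : Int) = 0 :=
        List.count_eq_zero.mpr (fun h =>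
          hmem ((mem_illegalSet_iff num_states illegal_states (m : Int) (by omega) hlt).mp h))
      rw [if_pos hmem]
      refine Prod.ext ?_ ?_
      · apply PySem.Dict.ext
        rw [PySem.Dict.items_insert_of_not_contains _ _ hcontains]
        simp [entryF, hmem]
      · simp only []
        push_cast
        omega

theorem createStateMapping_spec : Claim_equal_createStateMapping := by
  intro num_states illegal_states _
  unfold Spec_createStateMapping createStateMapping createStateMapping_alt
  by_cases hn : 0 ≤ num_states
  · have hcast : ((num_states.toNat : Int)) = num_states := Int.toNat_of_nonneg hn
    have hfold := fold_eq num_states illegal_states num_states.toNat (by omega)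
    rw [hcast] at hfold
    rw [hfold]
    apply List.map_congr_left
    intro s hs
    have hsr := PySem.List.mem_pyRange_one.mp hs
    have hmem : s ∈ illegalSet num_states illegal_states ↔ s ∈ illegal_states :=
      mem_illegalSet_iff num_states illegal_states s hsr.1 hsr.2
    simp only [entryF, illegalSet] at *
    by_cases h : s ∈ illegal_states
    · rw [if_pos h, if_pos (hmem.mpr h)]
    · rw [if_neg h, if_neg (fun hc => h (hmem.mp hc))]
      have hfun : (fun t : Int => if t < s then (1 : Int) else 0)
          = (fun t => if decide (t < s) = true then (1 : Int) else 0) := by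
        funext t; by_cases ht : t < s <;> simp [ht]
      rw [hfun, PySem.List.sum_map_ite_one_zero]
  · rw [PySem.List.pyRange_one_eq_nil (by omega)]
    simp [PySem.Dict.empty]
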